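-- pv_equiv track=rewrite | github.com/thiagothomas/marl | starcraft/training.py | _suggest_rollout_length
-- ===== SOURCE A (Python) =====
-- def _suggest_rollout_length(max_steps: int) -> int:
--     """Heuristic rollout length that grows with scenario horizon."""
--     if max_steps <= 0:
--         return 128
--     rollout = 128
--     while max_steps > rollout and rollout < 4096:
--         rollout *= 2
--     if max_steps > rollout:
--         return 4096
--     return rollout
-- ===== SOURCE B (Python) =====
-- def _suggest_rollout_length(max_steps: int) -> int:
--     """Heuristic rollout length that grows with scenario horizon."""
--     if max_steps <= 0:
--         return 128
--     p = 1 << (max_steps - 1).bit_length()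
--     return min(4096, max(128, p))
-- ===== Notes on version B (the rewrite author's own statement) =====
-- stated objective: simpler
-- what changed: Replaces the doubling while-loop with a closed-form next-power-of-two via bit_length plus a min/max clamp to [128, 4096].
import Mathlib
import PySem

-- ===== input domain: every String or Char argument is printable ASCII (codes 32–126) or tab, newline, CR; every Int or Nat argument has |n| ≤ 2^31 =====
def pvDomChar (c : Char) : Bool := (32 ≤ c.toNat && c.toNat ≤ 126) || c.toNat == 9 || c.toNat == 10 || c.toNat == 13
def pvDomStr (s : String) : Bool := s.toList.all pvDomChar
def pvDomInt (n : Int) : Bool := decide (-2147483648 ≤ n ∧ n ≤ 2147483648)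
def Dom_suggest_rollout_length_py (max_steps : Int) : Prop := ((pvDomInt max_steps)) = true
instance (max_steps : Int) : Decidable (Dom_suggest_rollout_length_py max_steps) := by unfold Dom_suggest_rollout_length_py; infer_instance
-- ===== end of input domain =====

-- B replaces A's doubling while-loop by a closed-form bit_length computation plus a clamp to [128, 4096] (simpler).
-- ===== PORT A =====
-- fuel-bounded transcription of A's while loop (rollout doubles 128→4096, so 6 steps of fuel always suffice)
def pvALoop : Nat → Int → Int → Int
  | 0, _, rollout => rollout
  | fuel + 1, max_steps, rollout =>
      if max_steps > rollout ∧ rollout < 4096 then pvALoop fuel max_steps (rollout * 2) else rollout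

def suggest_rollout_length_py (max_steps : Int) : Int :=
  if max_steps ≤ 0 then 128
  else
    let rollout := pvALoop 6 max_steps 128
    if max_steps > rollout then 4096 else rollout

-- ===== PORT B =====
-- Python's (n).bit_length() for n ≥ 0 is Nat.size n (exact on the nonnegative arguments B uses)
def pvBitLength (n : Int) : Nat := Nat.size n.toNat

def suggest_rollout_length_py_alt (max_steps : Int) : Int :=
  if max_steps ≤ 0 then 128
  else
    let p : Int := 2 ^ pvBitLength (max_steps - 1)
    min 4096 (max 128 p)

-- ===== PRECONDITION & SPEC =====
def Spec_suggest_rollout_length_py (max_steps : Int) (out : Int) : Prop := out = suggest_rollout_length_py_alt max_steps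
instance (max_steps : Int) (out : Int) : Decidable (Spec_suggest_rollout_length_py max_steps out) := by unfold Spec_suggest_rollout_length_py; infer_instance

-- ===== CLAIM (what is proved, stated in full; the proofs are below) =====
def Claim_equal_suggest_rollout_length_py : Prop := ∀ (max_steps : Int), Dom_suggest_rollout_length_py max_steps → Spec_suggest_rollout_length_py max_steps (suggest_rollout_length_py max_steps)

-- ===== LEMMAS AND PROOFS =====

-- ===== VERDICT (by name: the statement is the Claim_ definition above) =====
-- pin Nat.size on an interval [2^a, 2^(a+1))
theorem pv_size_eq (n a : Nat) (h1 : 2 ^ a ≤ n) (h2 : n < 2 ^ (a + 1)) : Nat.size n = a + 1 :=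
  le_antisymm (Nat.size_le.mpr h2) (Nat.lt_size.mpr h1)

theorem suggest_rollout_length_py_spec : Claim_equal_suggest_rollout_length_py := by
  intro m _
  unfold Spec_suggest_rollout_length_py suggest_rollout_length_py suggest_rollout_length_py_alt
  by_cases h0 : m ≤ 0
  · simp [h0]
  · simp only [if_neg h0]
    have hm1 : (1:Int) ≤ m := by omega
    have hcast : ((m - 1).toNat : Int) = m - 1 := by omega
    set n := (m - 1).toNat with hn
    rcases le_or_gt m 128 with h | h
    · have hs : Nat.size n ≤ 7 := Nat.size_le.mpr (by omega)
      have hp : (2:Int) ^ pvBitLength (m - 1) ≤ 128 := by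
        calc (2:Int) ^ pvBitLength (m - 1) ≤ 2 ^ 7 := by
              exact pow_le_pow_right₀ (by norm_num) hs
          _ = 128 := by norm_num
      have hA : pvALoop 6 m 128 = 128 := by
        rw [pvALoop, if_neg (by omega)]
        all_goals norm_num
      simp only [hA, if_neg (show ¬ m > 128 by omega)]
      have hppos : (0:Int) < 2 ^ pvBitLength (m - 1) := by positivity
      omega
    · -- 129 ≤ m: find the region [2^a+1, 2^(a+1)] (a = 7..11) or m > 4096
      rcases le_or_gt m 4096 with h2 | h2
      · have key : ∀ a : Nat, 7 ≤ a → a ≤ 11 → 2 ^ a < m → m ≤ 2 ^ (a + 1) →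
            pvBitLength (m - 1) = a + 1 := by
          intro a _ _ hlo hhi
          unfold pvBitLength
          rw [← hn]
          have c1 : ((2 ^ a : Nat) : Int) = (2 : Int) ^ a := by push_cast; ring
          have c2 : ((2 ^ (a + 1) : Nat) : Int) = (2 : Int) ^ (a + 1) := by push_cast; ring
          have hlo' : 2 ^ a ≤ n := by exact_mod_cast (by omega : ((2 ^ a : Nat) : Int) ≤ (n : Int))
          have hhi' : n < 2 ^ (a + 1) := by exact_mod_cast (by omega : ((n : Int)) < ((2 ^ (a + 1) : Nat) : Int))
          exact pv_size_eq n a hlo' hhi'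
        rcases le_or_gt m 256 with hr | hr
        · rw [key 7 (by norm_num) (by norm_num) (by omega) (by omega)]
          have hA : pvALoop 6 m 128 = 256 := by
            rw [pvALoop, if_pos (by omega), pvALoop, if_neg (by omega)]
            all_goals norm_num
          simp only [hA, if_neg (show ¬ m > 256 by omega)]; norm_num
        rcases le_or_gt m 512 with hr2 | hr2
        · rw [key 8 (by norm_num) (by norm_num) (by omega) (by omega)]
          have hA : pvALoop 6 m 128 = 512 := by
            rw [pvALoop, if_pos (by omega), pvALoop, if_pos (by omega), pvALoop, if_neg (by omega)]
            all_goals norm_num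
          simp only [hA, if_neg (show ¬ m > 512 by omega)]; norm_num
        rcases le_or_gt m 1024 with hr3 | hr3
        · rw [key 9 (by norm_num) (by norm_num) (by omega) (by omega)]
          have hA : pvALoop 6 m 128 = 1024 := by
            rw [pvALoop, if_pos (by omega), pvALoop, if_pos (by omega), pvALoop, if_pos (by omega),
              pvALoop, if_neg (by omega)]
            all_goals norm_num
          simp only [hA, if_neg (show ¬ m > 1024 by omega)]; norm_num
        rcases le_or_gt m 2048 with hr4 | hr4
        · rw [key 10 (by norm_num) (by norm_num) (by omega) (by omega)]
          have hA : pvALoop 6 m 128 = 2048 := by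
            rw [pvALoop, if_pos (by omega), pvALoop, if_pos (by omega), pvALoop, if_pos (by omega),
              pvALoop, if_pos (by omega), pvALoop, if_neg (by omega)]
            all_goals norm_num
          simp only [hA, if_neg (show ¬ m > 2048 by omega)]; norm_num
        · rw [key 11 (by norm_num) (by norm_num) (by omega) (by omega)]
          have hA : pvALoop 6 m 128 = 4096 := by
            rw [pvALoop, if_pos (by omega), pvALoop, if_pos (by omega), pvALoop, if_pos (by omega),
              pvALoop, if_pos (by omega), pvALoop, if_pos (by omega), pvALoop, if_neg (by omega)]
            all_goals norm_num
          simp only [hA, if_neg (show ¬ m > 4096 by omega)]; norm_num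
      · -- m > 4096: A returns 4096 via the cap; B's p ≥ 8192
        have hA : pvALoop 6 m 128 = 4096 := by
          rw [pvALoop, if_pos (by omega), pvALoop, if_pos (by omega), pvALoop, if_pos (by omega),
            pvALoop, if_pos (by omega), pvALoop, if_pos (by omega), pvALoop, if_neg (by omega)]
          all_goals norm_num
        have hs : 12 < Nat.size n := Nat.lt_size.mpr (by omega)
        have hp : (8192:Int) ≤ 2 ^ pvBitLength (m - 1) := by
          calc (8192:Int) = 2 ^ 13 := by norm_num
            _ ≤ 2 ^ pvBitLength (m - 1) := by
                exact pow_le_pow_right₀ (by norm_num) (by unfold pvBitLength; rw [← hn]; omega)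
        simp only [hA, if_pos (show m > 4096 by omega)]
        omega
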